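-- pv_equiv track=rewrite | github.com/dens77/Algorithms_project_2048 | game_logic.py | compress_with_priority
-- ===== SOURCE A (Python) =====
-- import heapq
--
-- def compress_with_priority(mat):
--     changed = False
--     new_mat = []
--     for i in range(4):
--         new_mat.append([0] * 4)
--     for i in range(4):
--         pq = []
--         for j in range(4):
--             if mat[i][j] != 0:
--                 heapq.heappush(pq, (j, mat[i][j]))
--
--         pos = 0
--         while pq:
--             idx, value = heapq.heappop(pq)
--             new_mat[i][pos] = value
--             if pos != idx:
--                 changed = True
--             pos += 1
--     return new_mat, changed
-- ===== SOURCE B (Python) =====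
-- def compress_with_priority(mat):
--     changed = False
--     new_mat = []
--     for i in range(4):
--         row = [0] * 4
--         pos = 0
--         for j in range(4):
--             v = mat[i][j]
--             if v != 0:
--                 row[pos] = v
--                 if pos != j:
--                     changed = True
--                 pos += 1
--         new_mat.append(row)
--     return new_mat, changed
-- ===== Notes on version B (the rewrite author's own statement) =====
-- stated objective: simpler
-- what changed: Replaces the heap of (column, value) pairs and the separate pop-while loop with a single left-to-right pass per row that writes each nonzero value at the next free position, so no priority queue and no second loop are needed.
import Mathlib
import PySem

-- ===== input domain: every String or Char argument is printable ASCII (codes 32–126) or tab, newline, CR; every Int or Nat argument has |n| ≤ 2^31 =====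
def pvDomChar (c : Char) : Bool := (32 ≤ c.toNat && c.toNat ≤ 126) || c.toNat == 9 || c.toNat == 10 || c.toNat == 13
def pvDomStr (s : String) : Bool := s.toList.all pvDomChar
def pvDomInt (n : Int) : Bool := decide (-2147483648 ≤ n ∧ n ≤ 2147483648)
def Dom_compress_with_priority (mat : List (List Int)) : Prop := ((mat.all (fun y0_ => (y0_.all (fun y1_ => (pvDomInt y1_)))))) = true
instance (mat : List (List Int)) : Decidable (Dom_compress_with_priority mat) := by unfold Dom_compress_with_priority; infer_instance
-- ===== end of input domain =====

-- B replaces A's per-row heap of (column, value) pairs plus a pop-while loop by one direct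
-- left-to-right pass that writes each nonzero value at the next free position (simpler).

-- ===== PORT A =====
-- heapq.heappush on a heap of (j, value) pairs, modeled as a list kept sorted by the Python
-- tuple order (lexicographic on Int); exact because heappop always returns the least element
-- and the list representation makes that the head.
def heappushA (pq : List (Int × Int)) (x : Int × Int) : List (Int × Int) :=
  match pq with
  | [] => [x]
  | y :: rest =>
      if x.1 < y.1 ∨ (x.1 = y.1 ∧ x.2 < y.2) then x :: y :: rest
      else y :: heappushA rest x

-- A's inner 'for j in range(4)' loop building the priority queue for row i.
def buildPqA (mat : List (List Int)) (i : Int) : List (Int × Int) :=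
  (PySem.List.pyRange 0 4 1).foldl
    (fun pq j =>
      if (PySem.List.pyGetD (PySem.List.pyGetD mat i []) j 0) ≠ 0 then
        heappushA pq (j, PySem.List.pyGetD (PySem.List.pyGetD mat i []) j 0)
      else pq) []

-- A's 'while pq:' loop: pop the minimum (the head of the sorted list), write it into the row
-- at position pos (new_mat[i][pos] = value), update changed, pos += 1.  pos is nonnegative
-- throughout, so .toNat is exact here.
def popLoopA (pq : List (Int × Int)) (row : List Int) (pos : Int) (changed : Bool) :
    List Int × Bool :=
  match pq with
  | [] => (row, changed)
  | (idx, value) :: rest =>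
      popLoopA rest (row.set pos.toNat value) (pos + 1)
        (if pos ≠ idx then true else changed)

def compress_with_priority (mat : List (List Int)) : List (List Int) × Bool :=
  -- new_mat = []; for i in range(4): new_mat.append([0]*4)
  let new_mat : List (List Int) :=
    (PySem.List.pyRange 0 4 1).foldl (fun acc _ => acc ++ [List.replicate 4 0]) []
  -- for i in range(4): build pq, then the pop loop; the in-place mutation of new_mat[i] is
  -- rendered as reading row i, running the pop loop on it, and setting it back.
  (PySem.List.pyRange 0 4 1).foldl
    (fun (st : List (List Int) × Bool) i =>
      let pq := buildPqA mat i
      let r := popLoopA pq (PySem.List.pyGetD st.1 i []) 0 st.2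
      (st.1.set i.toNat r.1, r.2))
    (new_mat, false)

-- ===== PORT B =====
-- B's inner 'for j in range(4)' pass over row i: state (row, pos, changed).
def passB (mat : List (List Int)) (i : Int) (ch : Bool) : List Int × Int × Bool :=
  (PySem.List.pyRange 0 4 1).foldl
    (fun (s : List Int × Int × Bool) j =>
      let v := PySem.List.pyGetD (PySem.List.pyGetD mat i []) j 0
      if v ≠ 0 then
        (s.1.set s.2.1.toNat v, s.2.1 + 1, if s.2.1 ≠ j then true else s.2.2)
      else s)
    (List.replicate 4 0, 0, ch)

def compress_with_priority_alt (mat : List (List Int)) : List (List Int) × Bool :=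
  (PySem.List.pyRange 0 4 1).foldl
    (fun (st : List (List Int) × Bool) i =>
      let r := passB mat i st.2
      (st.1 ++ [r.1], r.2.2))
    ([], false)

-- ===== PRECONDITION & SPEC =====
-- Pre_: exactly the inputs where A's mat[i][j] accesses (i, j in 0..3) do not raise IndexError.
def Pre_compress_with_priority (mat : List (List Int)) : Prop :=
  4 ≤ mat.length ∧ ∀ r ∈ mat.take 4, 4 ≤ r.length
instance (mat : List (List Int)) : Decidable (Pre_compress_with_priority mat) := by
  unfold Pre_compress_with_priority; infer_instance
def pvWitness_compress_with_priority : List (List Int) :=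
  [[2, 0, 2, 4], [0, 0, 0, 0], [4, 4, 0, 2], [0, 8, 0, 0]]
def Spec_compress_with_priority (mat : List (List Int)) (out : List (List Int) × Bool) : Prop := out = compress_with_priority_alt mat
instance (mat : List (List Int)) (out : List (List Int) × Bool) : Decidable (Spec_compress_with_priority mat out) := by unfold Spec_compress_with_priority; infer_instance

-- ===== CLAIM (what is proved, stated in full; the proofs are below) =====
def Claim_equal_compress_with_priority : Prop := ∀ (mat : List (List Int)), Dom_compress_with_priority mat → Pre_compress_with_priority mat → Spec_compress_with_priority mat (compress_with_priority mat)

-- ===== LEMMAS AND PROOFS =====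

-- Per-row agreement: A's build-heap-then-pop on row i equals B's single pass, for any
-- matrix, row index and incoming changed flag.
lemma row_eq (mat : List (List Int)) (i : Int) (ch : Bool) :
    popLoopA (buildPqA mat i) ([0, 0, 0, 0] : List Int) 0 ch =
      ((passB mat i ch).1, (passB mat i ch).2.2) := by
  by_cases h0 : PySem.List.pyGetD (PySem.List.pyGetD mat i []) 0 0 = 0 <;>
  by_cases h1 : PySem.List.pyGetD (PySem.List.pyGetD mat i []) 1 0 = 0 <;>
  by_cases h2 : PySem.List.pyGetD (PySem.List.pyGetD mat i []) 2 0 = 0 <;>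
  by_cases h3 : PySem.List.pyGetD (PySem.List.pyGetD mat i []) 3 0 = 0 <;>
    simp [buildPqA, passB, PySem.List.pyRange, List.range_succ, heappushA, popLoopA,
      h0, h1, h2, h3, List.foldl, List.set]

-- ===== VERDICT (by name: the statement is the Claim_ definition above) =====
theorem compress_with_priority_spec : Claim_equal_compress_with_priority := by
  intro mat _ _
  unfold Spec_compress_with_priority compress_with_priority compress_with_priority_alt
  simp [PySem.List.pyRange, List.range_succ, List.foldl, PySem.List.pyGetD,
    PySem.List.pyGet?, PySem.List.pyIdx?, row_eq, List.set]
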